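-- pv_equiv track=rewrite | github.com/axd353/WhenNoPathsLeadToRome | utils/FindDerivationForPositiveProgram.py | _move_neq_literals_to_end
-- ===== SOURCE A (Python) =====
-- from typing import Dict, List, Tuple, Set, Optional, Union
--
-- def _move_neq_literals_to_end(body: List[Tuple[str, List[str]]]) -> List[Tuple[str, List[str]]]:
--     """
--     Given a body list of (predicate, [args]), move any items whose predicate is '!=' to the end.
--     """
--     normal_lits = []
--     neq_lits = []
--     for (pred, args) in body:
--         if pred == '!=':
--             neq_lits.append((pred, args))
--         else:
--             normal_lits.append((pred, args))
--     return normal_lits + neq_lits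
-- ===== SOURCE B (Python) =====
-- def _move_neq_literals_to_end(body):
--     """Stable sort by the boolean key 'is a != literal': non-'!=' first, '!=' last."""
--     return sorted(body, key=lambda pr: pr[0] == '!=')
-- ===== Notes on version B (the rewrite author's own statement) =====
-- stated objective: idiomatic
-- what changed: Replaces the two-accumulator partition loop with a single stable sort on the boolean key pred == '!=', relying on Timsort stability to keep each group's original order.
import Mathlib
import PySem

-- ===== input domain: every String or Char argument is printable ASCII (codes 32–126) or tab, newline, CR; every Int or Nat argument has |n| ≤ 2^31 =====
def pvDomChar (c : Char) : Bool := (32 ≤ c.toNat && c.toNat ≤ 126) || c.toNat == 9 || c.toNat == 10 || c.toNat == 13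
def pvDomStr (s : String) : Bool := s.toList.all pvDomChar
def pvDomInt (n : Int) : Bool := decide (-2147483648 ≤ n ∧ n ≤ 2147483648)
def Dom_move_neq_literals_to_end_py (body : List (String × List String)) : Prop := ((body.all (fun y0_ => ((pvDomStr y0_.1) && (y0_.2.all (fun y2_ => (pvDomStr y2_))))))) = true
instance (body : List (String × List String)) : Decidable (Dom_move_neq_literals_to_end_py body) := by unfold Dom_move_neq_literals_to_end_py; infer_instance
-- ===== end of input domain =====

-- B replaces A's two-accumulator partition loop with one stable sort on the boolean key pred == '!=' (objective: idiomatic).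

-- ===== PORT A =====
-- two accumulator lists built by one pass, then concatenated
def move_neq_literals_to_end_py (body : List (String × List String)) : List (String × List String) :=
  let acc := body.foldl
    (fun (acc : List (String × List String) × List (String × List String)) pr =>
      if pr.1 == "!=" then (acc.1, acc.2 ++ [pr]) else (acc.1 ++ [pr], acc.2))
    ([], [])
  acc.1 ++ acc.2

-- ===== PORT B =====
-- sorted(body, key=lambda pr: pr[0] == '!='): stable sort, False before True
def move_neq_literals_to_end_py_alt (body : List (String × List String)) : List (String × List String) :=
  PySem.List.sorted body (fun pr => pr.1 == "!=") false

-- ===== PRECONDITION & SPEC =====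
def Spec_move_neq_literals_to_end_py (body : List (String × List String)) (out : List (String × List String)) : Prop := out = move_neq_literals_to_end_py_alt body
instance (body : List (String × List String)) (out : List (String × List String)) : Decidable (Spec_move_neq_literals_to_end_py body out) := by unfold Spec_move_neq_literals_to_end_py; infer_instance

-- ===== CLAIM (what is proved, stated in full; the proofs are below) =====
def Claim_equal_move_neq_literals_to_end_py : Prop := ∀ (body : List (String × List String)), Dom_move_neq_literals_to_end_py body → Spec_move_neq_literals_to_end_py body (move_neq_literals_to_end_py body)

-- ===== LEMMAS AND PROOFS =====

-- A's loop is a partition: accumulators extend by the filters of the remaining input.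
theorem partition_foldl_eq {α : Type} (p : α → Bool) (xs : List α) :
    ∀ (F T : List α),
      xs.foldl (fun acc x => if p x then (acc.1, acc.2 ++ [x]) else (acc.1 ++ [x], acc.2)) (F, T)
        = (F ++ xs.filter (fun x => !p x), T ++ xs.filter p) := by
  induction xs with
  | nil => intro F T; simp
  | cons x rest ih =>
    intro F T
    by_cases h : p x = true
    · simp [List.foldl_cons, h, ih, List.append_assoc]
    · simp only [Bool.not_eq_true] at h
      simp [List.foldl_cons, h, ih, List.append_assoc]

-- inserting an element whose Bool key is true goes to the very end
theorem insertBy_true_key {α : Type} (key : α → Bool) (x : α) (hx : key x = true)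
    (ys : List α) :
    PySem.List.insertBy (fun a b => decide ((key a : Bool) < key b)) x ys = ys ++ [x] := by
  apply PySem.List.insertBy_of_forall_not_before
  intro y _
  simp [hx]

-- inserting an element whose key is false skips the false-key prefix and lands before the true-key suffix
theorem insertBy_false_key {α : Type} (key : α → Bool) (x : α) (hx : key x = false)
    (F T : List α) (hF : ∀ y ∈ F, key y = false) (hT : ∀ y ∈ T, key y = true) :
    PySem.List.insertBy (fun a b => decide ((key a : Bool) < key b)) x (F ++ T)
      = (F ++ [x]) ++ T := by
  induction F with
  | nil =>
    cases T with
    | nil => simp [PySem.List.insertBy]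
    | cons t ts =>
      have ht : key t = true := hT t (by simp)
      simp [PySem.List.insertBy, hx, ht]
  | cons f fs ih =>
    have hf : key f = false := hF f (by simp)
    have hrec := ih (fun y hy => hF y (List.mem_cons_of_mem _ hy))
    simp [PySem.List.insertBy, hx, hf, hrec]

-- the stable insertion sort on a Bool key is exactly the partition
theorem foldl_insertBy_partition {α : Type} (key : α → Bool) (xs : List α) :
    ∀ (F T : List α), (∀ y ∈ F, key y = false) → (∀ y ∈ T, key y = true) →
      xs.foldl (fun acc x => PySem.List.insertBy (fun a b => decide ((key a : Bool) < key b)) x acc) (F ++ T)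
        = (F ++ xs.filter (fun x => !key x)) ++ (T ++ xs.filter key) := by
  induction xs with
  | nil => intro F T _ _; simp
  | cons x rest ih =>
    intro F T hF hT
    by_cases h : key x = true
    · have hstep : PySem.List.insertBy (fun a b => decide ((key a : Bool) < key b)) x (F ++ T)
          = F ++ (T ++ [x]) := by
        rw [insertBy_true_key key x h]; simp
      have hT' : ∀ y ∈ T ++ [x], key y = true := by
        intro y hy
        rcases List.mem_append.mp hy with h' | h'
        · exact hT y h'
        · simp at h'; simpa [h'] using h
      rw [List.foldl_cons, hstep, ih F (T ++ [x]) hF hT']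
      simp [h, List.append_assoc]
    · simp only [Bool.not_eq_true] at h
      have hF' : ∀ y ∈ F ++ [x], key y = false := by
        intro y hy
        rcases List.mem_append.mp hy with h' | h'
        · exact hF y h'
        · simp at h'; simpa [h'] using h
      rw [List.foldl_cons, insertBy_false_key key x h F T hF hT,
        ih (F ++ [x]) T hF' hT]
      simp [h, List.append_assoc]

theorem sorted_bool_key {α : Type} (key : α → Bool) (xs : List α) :
    PySem.List.sorted xs (fun x => key x) false
      = xs.filter (fun x => !key x) ++ xs.filter key := by
  rw [PySem.List.sorted_eq_foldl_insertBy]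
  have := foldl_insertBy_partition key xs [] [] (by simp) (by simp)
  simpa using this

-- ===== VERDICT (by name: the statement is the Claim_ definition above) =====
theorem move_neq_literals_to_end_py_spec : Claim_equal_move_neq_literals_to_end_py := by
  intro body _
  unfold Spec_move_neq_literals_to_end_py move_neq_literals_to_end_py move_neq_literals_to_end_py_alt
  have h := partition_foldl_eq (fun (pr : String × List String) => pr.1 == "!=") body [] []
  simp only [List.nil_append] at h
  rw [sorted_bool_key, h]
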